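-- pv_equiv track=rewrite | github.com/lukaszromak/Aoc2023 | day15/day15.py | execute_operations
-- ===== SOURCE A (Python) =====
-- def hash_function(string):
--     current_val = 0
--
--     for char in string:
--         current_val += ord(char)
--         current_val *= 17
--         current_val = current_val % 256
--
--     return current_val
--
-- def execute_operations(operations):
--     boxes = [[] for x in range(256)]
--
--     for operation in operations:
--         op_code = operation[0]
--         label = operation[1]
--         box = hash_function(label)
--         indices = [idx for idx, x in enumerate(boxes[box]) if x.split(" ")[0] == label]
--
--         if op_code == "-":
--             if len(indices) == 1:
--                 boxes[box].pop(indices[0])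
--         elif op_code == "=":
--             value = operation[2]
--             if len(indices) == 0:
--                 boxes[box].append("{} {}".format(label, value))
--             else:
--                 boxes[box] =  boxes[box][:indices[0]] + ["{} {}".format(label, value)] + boxes[box][indices[0] + 1:]
--
--     return boxes
-- ===== SOURCE B (Python) =====
-- def hash_function(string):
--     current_val = 0
--     for char in string:
--         current_val += ord(char)
--         current_val *= 17
--         current_val = current_val % 256
--     return current_val
--
-- def execute_operations(operations):
--     # One insertion-ordered dict instead of 256 live box lists; hashing is
--     # deferred to a single reconstruction pass at the end.
--     state = {}
--     for operation in operations:
--         op_code = operation[0]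
--         label = operation[1]
--         if op_code == "-":
--             state.pop(label, None)
--         elif op_code == "=":
--             state[label] = operation[2]
--     boxes = [[] for _ in range(256)]
--     for label, value in state.items():
--         boxes[hash_function(label)].append("{} {}".format(label, value))
--     return boxes
-- ===== Notes on version B (the rewrite author's own statement) =====
-- stated objective: simpler
-- what changed: B replaces the 256 live box lists (hash + per-operation scan/splice of the right box) by a single insertion-ordered dict label->value updated in one pass, and rebuilds the 256 boxes from the surviving entries in a separate second pass that is the only place hashing happens.
import Mathlib
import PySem

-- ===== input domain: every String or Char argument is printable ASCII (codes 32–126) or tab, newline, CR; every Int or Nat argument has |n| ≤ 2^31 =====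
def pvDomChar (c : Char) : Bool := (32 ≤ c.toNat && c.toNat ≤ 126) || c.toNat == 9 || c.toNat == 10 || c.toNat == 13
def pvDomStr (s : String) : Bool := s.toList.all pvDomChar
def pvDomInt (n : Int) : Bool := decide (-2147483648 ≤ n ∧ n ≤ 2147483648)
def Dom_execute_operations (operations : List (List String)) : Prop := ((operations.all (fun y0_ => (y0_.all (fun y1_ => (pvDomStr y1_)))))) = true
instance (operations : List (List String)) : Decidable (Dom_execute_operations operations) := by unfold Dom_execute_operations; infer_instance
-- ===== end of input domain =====

-- B replaces A's 256 live box lists (hash + scan/splice of a box per operation) by one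
-- insertion-ordered dict label -> value updated in a single pass, rebuilding the 256 boxes
-- from the surviving entries in a separate second pass (objective: simpler).

-- ===== PORT A =====
def hash_function (string : String) : Int :=
  string.toList.foldl
    (fun current_val char => PySem.Int.mod ((current_val + (char.toNat : Int)) * 17) 256) 0

-- x.split(" ")[0]: split(" ") never returns an empty list, so the [0] never raises
def firstTok (x : String) : String :=
  PySem.List.pyGetD ((PySem.Str.split? x " ").getD []) 0 ""

-- the body of A's `for operation in operations` loop
def opStep (boxes : List (List String)) (operation : List String) : List (List String) :=
  match PySem.List.pyGet? operation 0, PySem.List.pyGet? operation 1 with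
  | some op_code, some label =>
    let box := hash_function label
    -- hash_function is provably in [0, 256), so these box accesses never raise and
    -- `box.toNat` is the exact Python index
    let bl := PySem.List.pyGetD boxes box []
    let indices :=
      ((PySem.List.enumerate bl).filter (fun q => firstTok q.2 == label)).map (fun q => q.1)
    if op_code = "-" then
      if indices.length = 1 then
        -- indices[0] cannot raise (length = 1), nor can the pop (index from enumerate)
        match PySem.List.pop? bl (PySem.List.pyGetD indices 0 0) with
        | some r => boxes.set box.toNat r.2
        | none => boxes
      else boxes
    else if op_code = "=" then
      match PySem.List.pyGet? operation 2 with
      | some value =>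
        if indices.length = 0 then
          boxes.set box.toNat (bl ++ [label ++ " " ++ value])
        else
          let i := PySem.List.pyGetD indices 0 0
          boxes.set box.toNat
            (PySem.List.slice bl none (some i) ++ [label ++ " " ++ value]
              ++ PySem.List.slice bl (some (i + 1)) none)
      | none => boxes  -- Python raises IndexError here; Pre_ excludes such inputs
    else boxes
  | _, _ => boxes  -- operation shorter than 2: Python raises IndexError; Pre_ excludes

def execute_operations (operations : List (List String)) : List (List String) :=
  operations.foldl opStep (List.replicate 256 [])

-- ===== PORT B =====
-- the body of B's dict pass: '-' removes the label, '=' overwrites/appends it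
def altStep (state : PySem.Dict String String) (operation : List String) : PySem.Dict String String :=
  match PySem.List.pyGet? operation 0, PySem.List.pyGet? operation 1 with
  | some op_code, some label =>
    if op_code = "-" then state.erase label
    else if op_code = "=" then
      match PySem.List.pyGet? operation 2 with
      | some value => state.insert label value
      | none => state  -- Python raises IndexError here; Pre_ excludes such inputs
    else state
  | _, _ => state  -- operation shorter than 2: Python raises IndexError; Pre_ excludes

-- the body of B's reconstruction pass (hash_function is in [0, 256): index is exact)
def altFill (boxes : List (List String)) (p : String × String) : List (List String) :=
  boxes.set (hash_function p.1).toNat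
    (PySem.List.pyGetD boxes (hash_function p.1) [] ++ [p.1 ++ " " ++ p.2])

def execute_operations_alt (operations : List (List String)) : List (List String) :=
  let state := operations.foldl altStep PySem.Dict.empty
  state.items.foldl altFill (List.replicate 256 [])

-- ===== PRECONDITION & SPEC =====
-- Pre_ excludes (i) operations shorter than 2 items, and '=' operations shorter than 3,
-- on which A raises IndexError, and (ii) '=' operations whose label contains a space, on
-- which A's split-on-space matching of the stored "label value" strings never matches that
-- label again (a representation artefact that B's dict keyed by the full label cannot share).
def Pre_execute_operations (operations : List (List String)) : Prop :=
  ∀ op ∈ operations,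
    2 ≤ op.length ∧ (op.getD 0 "" = "=" → 3 ≤ op.length ∧ ' ' ∉ (op.getD 1 "").toList)
instance (operations : List (List String)) : Decidable (Pre_execute_operations operations) := by
  unfold Pre_execute_operations; infer_instance

def pvWitness_execute_operations : List (List String) :=
  [["=", "ab", "1"], ["=", "cd", "2"], ["-", "ab"], ["=", "cd", "3"], ["?", "zz"]]

def Spec_execute_operations (operations : List (List String)) (out : List (List String)) : Prop :=
  out = execute_operations_alt operations
instance (operations : List (List String)) (out : List (List String)) :
    Decidable (Spec_execute_operations operations out) := by
  unfold Spec_execute_operations; infer_instance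

-- ===== CLAIM (what is proved, stated in full; the proofs are below) =====
def Claim_equal_execute_operations : Prop :=
  ∀ (operations : List (List String)), Dom_execute_operations operations →
    Pre_execute_operations operations →
    Spec_execute_operations operations (execute_operations operations)

-- ===== LEMMAS AND PROOFS =====

-- the hash value as a Nat box index, and the stored "label value" string of an entry
def hB (l : String) : Nat := (hash_function l).toNat
def fmtP (p : String × String) : String := p.1 ++ " " ++ p.2

-- the 256 boxes determined by a list of (label, value) entries
def boxesOf (items : List (String × String)) : List (List String) :=
  (List.range 256).map (fun b => (items.filter (fun p => hB p.1 == b)).map fmtP)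


theorem hash_bounds (l : String) : 0 ≤ hash_function l ∧ hash_function l < 256 := by
  unfold hash_function
  have h : ∀ (cs : List Char) (a : Int), 0 ≤ a → a < 256 →
      0 ≤ cs.foldl (fun current_val char =>
        PySem.Int.mod ((current_val + (char.toNat : Int)) * 17) 256) a ∧
      cs.foldl (fun current_val char =>
        PySem.Int.mod ((current_val + (char.toNat : Int)) * 17) 256) a < 256 := by
    intro cs
    induction cs with
    | nil => intro a h1 h2; exact ⟨h1, h2⟩
    | cons c cs ih =>
      intro a _ _
      exact ih _ (PySem.Int.mod_nonneg _ (by norm_num)) (PySem.Int.mod_lt _ (by norm_num))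
  exact h l.toList 0 (by norm_num) (by norm_num)

theorem hB_lt (l : String) : hB l < 256 := by
  have := hash_bounds l; unfold hB; omega

theorem hash_cast (l : String) : ((hB l : Nat) : Int) = hash_function l := by
  have := hash_bounds l; unfold hB; omega

-- accumulator shape of PySem.Chars.splitOn.go (specific to the " "-separator use in firstTok)
theorem go_acc : ∀ (fuel : Nat) (s cur : List Char) (acc : List (List Char)),
    PySem.Chars.splitOn.go [' '] fuel s cur acc
      = acc.reverse ++ PySem.Chars.splitOn.go [' '] fuel s cur [] := by
  intro fuel
  induction fuel with
  | zero => intro s cur acc; simp [PySem.Chars.splitOn.go]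
  | succ n ih =>
    intro s cur acc
    cases s with
    | nil => simp [PySem.Chars.splitOn.go]
    | cons c rest =>
      simp only [PySem.Chars.splitOn.go]
      by_cases h : List.isPrefixOf [' '] (c :: rest)
      · simp only [h, if_true]
        rw [ih _ _ (cur.reverse :: acc), ih _ _ (cur.reverse :: [])]
        simp
      · simp only [h]
        exact ih _ _ acc

theorem go_sep (fuel : Nat) (v cur : List Char) (acc : List (List Char)) :
    PySem.Chars.splitOn.go [' '] (fuel + 1) (' ' :: v) cur acc
      = PySem.Chars.splitOn.go [' '] fuel v [] (cur.reverse :: acc) := by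
  simp [PySem.Chars.splitOn.go, List.isPrefixOf]

theorem go_skip : ∀ (l : List Char), ' ' ∉ l →
    ∀ (fuel : Nat) (v cur : List Char) (acc : List (List Char)), l.length < fuel →
    PySem.Chars.splitOn.go [' '] fuel (l ++ v) cur acc
      = PySem.Chars.splitOn.go [' '] (fuel - l.length) v (l.reverse ++ cur) acc := by
  intro l
  induction l with
  | nil => intro _ fuel v cur acc _; simp
  | cons c cs ih =>
    intro hns fuel v cur acc hf
    obtain ⟨n, rfl⟩ : ∃ n, fuel = n + 1 := ⟨fuel - 1, by omega⟩
    have hc : c ≠ ' ' := by intro h; exact hns (by simp [h])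
    have hpre : List.isPrefixOf [' '] (c :: (cs ++ v)) = false := by
      simp [List.isPrefixOf]; exact fun h => absurd h.symm hc
    simp only [List.cons_append, PySem.Chars.splitOn.go, hpre]
    rw [ih (fun h => hns (by simp [h])) n v (c :: cur) acc (by simpa using hf)]
    have hlen : n + 1 - (c :: cs).length = n - cs.length := by simp
    rw [hlen]
    simp [List.append_assoc]

theorem firstTok_fmt (l v : String) (h : ' ' ∉ l.toList) : firstTok (l ++ " " ++ v) = l := by
  unfold firstTok
  have htl : (l ++ " " ++ v).toList = l.toList ++ ' ' :: v.toList := by simp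
  have hsep : (" " : String).toList = [' '] := by decide
  have hsplit : PySem.Chars.splitOn (l.toList ++ ' ' :: v.toList) [' ']
      = l.toList :: PySem.Chars.splitOn.go [' '] (v.toList.length + 1) v.toList [] [] := by
    unfold PySem.Chars.splitOn
    rw [show (l.toList ++ ' ' :: v.toList).length + 1
        = l.toList.length + (v.toList.length + 2) by simp; omega]
    rw [go_skip l.toList h _ _ _ _ (by omega)]
    rw [show l.toList.length + (v.toList.length + 2) - l.toList.length
        = (v.toList.length + 1) + 1 by omega]
    rw [go_sep]
    rw [go_acc]
    simp
  rw [PySem.Str.split?]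
  rw [htl, hsep]
  rw [PySem.Chars.split?]
  simp only [List.isEmpty_cons, Bool.false_eq_true, if_false]
  rw [hsplit]
  simp [PySem.List.pyGetD]

theorem length_boxesOf (items : List (String × String)) : (boxesOf items).length = 256 := by
  simp only [boxesOf, List.length_map, List.length_range]

theorem getElem_boxesOf (items : List (String × String)) (b : Nat) (hb : b < 256) :
    (boxesOf items)[b]'(by simp [length_boxesOf, hb]) =
      (items.filter (fun p => hB p.1 == b)).map fmtP := by
  simp [boxesOf]

theorem foldB_fill (items : List (String × String)) :
    ∀ (bx : List (List String)), bx.length = 256 →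
      items.foldl altFill bx =
        (List.range 256).map
          (fun b => bx.getD b [] ++ (items.filter (fun p => hB p.1 == b)).map fmtP) := by
  induction items with
  | nil =>
    intro bx hlen
    simp only [List.foldl_nil, List.filter_nil, List.map_nil, List.append_nil]
    apply List.ext_getElem (by simp [hlen])
    intro i h1 h2
    simp only [List.getElem_map, List.getElem_range]
    rw [List.getD_eq_getElem bx [] h1]
  | cons p items ih =>
    intro bx hlen
    have hb := hash_bounds p.1
    have hbl : hB p.1 < 256 := hB_lt p.1
    have hget : PySem.List.pyGetD bx (hash_function p.1) [] = bx.getD (hB p.1) [] := by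
      rw [PySem.List.pyGetD_eq_getElem bx [] hb.1 (by rw [hlen]; exact_mod_cast hb.2)]
      rw [List.getD_eq_getElem bx [] (by omega)]
      rfl
    simp only [List.foldl_cons]
    rw [show altFill bx p = bx.set (hB p.1) (bx.getD (hB p.1) [] ++ [fmtP p]) by
      simp [altFill, hget]; rfl]
    rw [ih _ (by simp [hlen])]
    apply List.map_congr_left
    intro b hbmem
    have hb256 : b < 256 := List.mem_range.mp hbmem
    have hset : (bx.set (hB p.1) (bx.getD (hB p.1) [] ++ [fmtP p])).getD b []
        = if hB p.1 = b then bx.getD b [] ++ [fmtP p] else bx.getD b [] := by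
      rw [List.getD_eq_getElem _ [] (by simp [hlen]; omega)]
      rw [List.getElem_set]
      split_ifs with h
      · subst h; rfl
      · exact (List.getD_eq_getElem bx [] (by omega)).symm
    rw [hset, List.filter_cons]
    by_cases h : hB p.1 = b
    · simp [h, List.append_assoc]
    · have : (hB p.1 == b) = false := by simpa using h
      simp [h, this]

theorem boxesOf_nil : boxesOf [] = List.replicate 256 [] := by
  apply List.ext_getElem
    (by simp only [boxesOf, List.length_map, List.length_range, List.length_replicate])
  intro i h1 h2
  simp only [boxesOf, List.filter_nil, List.map_nil, List.getElem_map,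
    List.getElem_replicate]

theorem getD_replicate_nil (b : Nat) :
    (List.replicate 256 ([] : List String)).getD b [] = [] := by
  by_cases h : b < 256
  · rw [List.getD_eq_getElem _ [] (by simpa only [List.length_replicate] using h)]
    simp only [List.getElem_replicate]
  · rw [List.getD_eq_default _ [] (by simpa only [List.length_replicate] using by omega)]

theorem alt_eq_boxesOf (operations : List (List String)) :
    execute_operations_alt operations =
      boxesOf (operations.foldl altStep PySem.Dict.empty).items := by
  unfold execute_operations_alt
  rw [foldB_fill _ _ (by simp only [List.length_replicate])]
  unfold boxesOf
  apply List.map_congr_left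
  intro b _
  rw [getD_replicate_nil]
  simp only [List.nil_append]

theorem idxAll (label : String) :
    ∀ (xs : List (String × String)) (s : Int), (∀ p ∈ xs, ' ' ∉ p.1.toList) →
      label ∉ xs.map (fun p => p.1) →
      (PySem.List.enumerate (xs.map fmtP) s).filter (fun q => firstTok q.2 == label) = [] := by
  intro xs
  induction xs with
  | nil => intro s _ _; simp [PySem.List.enumerate_nil]
  | cons p xs ih =>
    intro s hns hno
    simp only [List.map_cons, PySem.List.enumerate_cons, List.filter_cons]
    have h1 : firstTok (fmtP p) = p.1 := firstTok_fmt _ _ (hns p (by simp))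
    have h2 : (firstTok (fmtP p) == label) = false := by
      rw [h1]; simp only [beq_eq_false_iff_ne, ne_eq]
      intro he; exact hno (by simp [he])
    simp only [h2, Bool.false_eq_true, if_false]
    exact ih (s + 1) (fun q hq => hns q (by simp [hq]))
      (fun hm => hno (by simp at hm ⊢; right; exact hm))

theorem idxMid (as bs : List (String × String)) (v label : String)
    (hnsa : ∀ p ∈ as, ' ' ∉ p.1.toList) (hnsb : ∀ p ∈ bs, ' ' ∉ p.1.toList)
    (hnl : ' ' ∉ label.toList)
    (hna : label ∉ as.map (fun p => p.1)) (hnb : label ∉ bs.map (fun p => p.1)) :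
    (((PySem.List.enumerate ((as ++ (label, v) :: bs).map fmtP)).filter
        (fun q => firstTok q.2 == label)).map (fun q => q.1)) = [(as.length : Int)] := by
  rw [List.map_append, PySem.List.enumerate_append, List.filter_append]
  rw [idxAll label as 0 hnsa hna]
  simp only [List.map_cons, PySem.List.enumerate_cons, List.filter_cons, List.nil_append]
  have h1 : firstTok (fmtP (label, v)) = label := firstTok_fmt _ _ hnl
  simp only [h1, beq_self_eq_true, if_true]
  rw [idxAll label bs _ hnsb hnb]
  simp

theorem eraseIdx_mid (l1 l2 : List String) (a : String) :
    (l1 ++ a :: l2).eraseIdx l1.length = l1 ++ l2 := by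
  induction l1 with
  | nil => rfl
  | cons x xs ih => simpa using ih

theorem drop_mid (l1 l2 : List String) (a : String) :
    (l1 ++ a :: l2).drop (l1.length + 1) = l2 := by
  induction l1 with
  | nil => rfl
  | cons x xs ih => simp [ih]

theorem decomp (d : PySem.Dict String String) (label : String)
    (hnd : d.keys.Nodup) (hmem : label ∈ d.keys) :
    ∃ As v Bs, d.items = As ++ (label, v) :: Bs ∧
      label ∉ As.map (fun p => p.1) ∧ label ∉ Bs.map (fun p => p.1) := by
  have hk : d.keys = d.items.map (fun p => p.1) := rfl
  rw [hk] at hnd hmem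
  obtain ⟨p, hp, hp1⟩ := List.mem_map.mp hmem
  obtain ⟨As, Bs, hsplit⟩ := List.append_of_mem hp
  obtain ⟨pl, pv⟩ := p
  cases hp1
  refine ⟨As, pv, Bs, hsplit, ?_, ?_⟩
  · rw [hsplit] at hnd
    simp only [List.map_append, List.map_cons] at hnd
    have hdisj := (List.nodup_append.mp hnd).2.2
    intro hmem'
    exact hdisj _ hmem' pl (by simp) rfl
  · rw [hsplit] at hnd
    simp only [List.map_append, List.map_cons] at hnd
    exact (List.nodup_cons.mp (List.nodup_append.mp hnd).2.1).1

theorem boxesOf_set (items nits : List (String × String)) (hsh : Nat) (h256 : hsh < 256)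
    (nb : List String)
    (hEq : nb = (nits.filter (fun p => hB p.1 == hsh)).map fmtP)
    (hOther : ∀ b : Nat, b < 256 → b ≠ hsh →
      (items.filter (fun p => hB p.1 == b)).map fmtP
        = (nits.filter (fun p => hB p.1 == b)).map fmtP) :
    (boxesOf items).set hsh nb = boxesOf nits := by
  apply List.ext_getElem
    (by simp only [List.length_set, boxesOf, List.length_map, List.length_range])
  intro i h1 h2
  have hi : i < 256 := by
    simpa only [List.length_set, boxesOf, List.length_map, List.length_range] using h1
  rw [List.getElem_set]
  simp only [boxesOf, List.getElem_map, List.getElem_range]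
  split_ifs with h
  · subst h; exact hEq
  · exact hOther i hi (fun he => h he.symm)

theorem pyGet?_one_cons {α : Type} (x y : α) (r : List α) :
    PySem.List.pyGet? (x :: y :: r) 1 = some y := by
  simp [PySem.List.pyGet?, PySem.List.pyIdx?]

theorem pyGet?_two_cons {α : Type} (x y z : α) (r : List α) :
    PySem.List.pyGet? (x :: y :: z :: r) 2 = some z := by
  simp only [PySem.List.pyGet?, PySem.List.pyIdx?]
  rw [if_pos (by norm_num : (0:Int) ≤ 2),
    if_pos (show (2:Int) < ((x :: y :: z :: r).length:Int) by simp; omega)]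
  show (x :: y :: z :: r)[(2:Int).toNat]? = some z
  rfl

theorem erase_keys_sublist (d : PySem.Dict String String) (k : String) :
    (d.erase k).keys.Sublist d.keys := by
  have h1 : (d.erase k).items.Sublist d.items := List.filter_sublist
  exact h1.map (fun p => p.1)

theorem altStep_nodup (d : PySem.Dict String String) (op : List String)
    (hnd : d.keys.Nodup) : (altStep d op).keys.Nodup := by
  unfold altStep
  cases PySem.List.pyGet? op 0 with
  | none => exact hnd
  | some op_code =>
    cases PySem.List.pyGet? op 1 with
    | none => exact hnd
    | some label =>
      simp only
      split_ifs with h1 h2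
      · exact hnd.sublist (erase_keys_sublist d label)
      · cases PySem.List.pyGet? op 2 with
        | none => exact hnd
        | some value => exact PySem.Dict.nodup_keys_insert d label value hnd
      · exact hnd

theorem altStep_nospace (d : PySem.Dict String String) (op : List String)
    (hlen : 2 ≤ op.length) (hpre : op.getD 0 "" = "=" → ' ' ∉ (op.getD 1 "").toList)
    (hns : ∀ k ∈ d.keys, ' ' ∉ k.toList) : ∀ k ∈ (altStep d op).keys, ' ' ∉ k.toList := by
  obtain ⟨a, b, r, rfl⟩ : ∃ a b r, op = a :: b :: r := by
    match op, hlen with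
    | a :: b :: r, _ => exact ⟨a, b, r, rfl⟩
  unfold altStep
  rw [PySem.List.pyGet?_zero_cons, pyGet?_one_cons]
  simp only
  split_ifs with hc1 hc2
  · intro k hk
    exact hns k ((erase_keys_sublist d b).mem hk)
  · cases PySem.List.pyGet? (a :: b :: r) 2 with
    | none => exact hns
    | some value =>
      intro k hk
      rcases (PySem.Dict.mem_keys_insert d b k value).mp hk with h | h
      · rw [h]; exact hpre (by simpa using hc2)
      · exact hns k h
  · exact hns

theorem filter_mid_self (As Bs : List (String × String)) (label v : String) :
    (As ++ (label, v) :: Bs).filter (fun p => hB p.1 == hB label)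
      = As.filter (fun p => hB p.1 == hB label) ++ (label, v)
          :: Bs.filter (fun p => hB p.1 == hB label) := by
  rw [List.filter_append, List.filter_cons]
  simp

theorem filter_mid_ne (As Bs : List (String × String)) (label v : String) (b : Nat)
    (hb : b ≠ hB label) :
    (As ++ (label, v) :: Bs).filter (fun p => hB p.1 == b)
      = (As ++ Bs).filter (fun p => hB p.1 == b) := by
  rw [List.filter_append, List.filter_cons, List.filter_append]
  have : (hB label == b) = false := by simpa using fun h => hb h.symm
  simp [this]

theorem filter_nokey (As : List (String × String)) (label : String)
    (hna : label ∉ As.map (fun p => p.1)) :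
    As.filter (fun p => !(p.1 == label)) = As := by
  apply List.filter_eq_self.mpr
  intro p hp
  simp only [Bool.not_eq_eq_eq_not, Bool.not_true, beq_eq_false_iff_ne, ne_eq]
  intro he
  exact hna (List.mem_map.mpr ⟨p, hp, he⟩)

theorem opStep_boxesOf (d : PySem.Dict String String) (op : List String)
    (hpre : 2 ≤ op.length ∧ (op.getD 0 "" = "=" → 3 ≤ op.length ∧ ' ' ∉ (op.getD 1 "").toList))
    (hnd : d.keys.Nodup) (hns : ∀ k ∈ d.keys, ' ' ∉ k.toList) :
    opStep (boxesOf d.items) op = boxesOf (altStep d op).items := by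
  obtain ⟨op0, op1, rest, rfl⟩ : ∃ a b r, op = a :: b :: r := by
    match op, hpre.1 with
    | a :: b :: r, _ => exact ⟨a, b, r, rfl⟩
  have hb := hash_bounds op1
  have hb256 : hB op1 < 256 := hB_lt op1
  have hcast : ((hB op1 : Nat) : Int) = hash_function op1 := hash_cast op1
  -- the touched box of A is exactly the entries of d hashing there
  have hbl : PySem.List.pyGetD (boxesOf d.items) (hash_function op1) []
      = (d.items.filter (fun p => hB p.1 == hB op1)).map fmtP := by
    rw [← hcast, PySem.List.pyGetD_eq_getElem _ []
      (by positivity) (by rw [length_boxesOf]; exact_mod_cast hb256)]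
    simp only [Int.toNat_natCast]
    exact getElem_boxesOf d.items (hB op1) hb256
  have hsetN : (hash_function op1).toNat = hB op1 := rfl
  have hnsf : ∀ p ∈ d.items.filter (fun p => hB p.1 == hB op1), ' ' ∉ p.1.toList := by
    intro p hp
    exact hns p.1 (List.mem_map.mpr ⟨p, (List.mem_filter.mp hp).1, rfl⟩)
  unfold opStep altStep
  rw [PySem.List.pyGet?_zero_cons, pyGet?_one_cons]
  simp only [hbl, hsetN]
  by_cases hdash : op0 = "-"
  · simp only [hdash, if_true]
    by_cases hmem : op1 ∈ d.keys
    · have hnl : ' ' ∉ op1.toList := hns op1 hmem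
      obtain ⟨As, v, Bs, hitems, hna, hnb⟩ := decomp d op1 hnd hmem
      have hnsa : ∀ p ∈ As.filter (fun p => hB p.1 == hB op1), ' ' ∉ p.1.toList := by
        intro p hp
        exact hnsf p (by rw [hitems, filter_mid_self]; exact List.mem_append_left _ hp)
      have hnsb : ∀ p ∈ Bs.filter (fun p => hB p.1 == hB op1), ' ' ∉ p.1.toList := by
        intro p hp
        exact hnsf p
          (by rw [hitems, filter_mid_self]; exact List.mem_append_right _ (List.mem_cons_of_mem _ hp))
      have hna' : op1 ∉ (As.filter (fun p => hB p.1 == hB op1)).map (fun p => p.1) := by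
        intro hm
        obtain ⟨p, hp, he⟩ := List.mem_map.mp hm
        exact hna (List.mem_map.mpr ⟨p, (List.mem_filter.mp hp).1, he⟩)
      have hnb' : op1 ∉ (Bs.filter (fun p => hB p.1 == hB op1)).map (fun p => p.1) := by
        intro hm
        obtain ⟨p, hp, he⟩ := List.mem_map.mp hm
        exact hnb (List.mem_map.mpr ⟨p, (List.mem_filter.mp hp).1, he⟩)
      set as' := As.filter (fun p => hB p.1 == hB op1) with has'
      set bs' := Bs.filter (fun p => hB p.1 == hB op1) with hbs'
      have hfil : d.items.filter (fun p => hB p.1 == hB op1) = as' ++ (op1, v) :: bs' := by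
        rw [hitems]; exact filter_mid_self As Bs op1 v
      rw [hfil, List.map_append, List.map_cons]
      rw [show (((PySem.List.enumerate (as'.map fmtP ++ fmtP (op1, v) :: bs'.map fmtP)).filter
            (fun q => firstTok q.2 == op1)).map (fun q => q.1)) = [(as'.length : Int)] by
        have := idxMid as' bs' v op1 hnsa hnsb hnl hna' hnb'
        simpa using this]
      simp only [List.length_cons, List.length_nil, if_pos rfl]
      rw [show PySem.List.pyGetD [(as'.length : Int)] 0 0 = (as'.length : Int) by
        simp [PySem.List.pyGetD]]
      rw [show as'.map fmtP ++ fmtP (op1, v) :: bs'.map fmtP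
            = (as'.map fmtP) ++ fmtP (op1, v) :: (bs'.map fmtP) from rfl]
      rw [PySem.List.pop?_natCast _ as'.length (by simp)]
      simp only
      rw [show (as'.map fmtP ++ fmtP (op1, v) :: bs'.map fmtP).eraseIdx as'.length
            = as'.map fmtP ++ bs'.map fmtP by
        rw [show as'.length = (as'.map fmtP).length by simp]
        exact eraseIdx_mid _ _ _]
      have herase : (d.erase op1).items = As ++ Bs := by
        show d.items.filter (fun p => !(p.1 == op1)) = As ++ Bs
        rw [hitems, List.filter_append, List.filter_cons]
        simp only [beq_self_eq_true, Bool.not_true, Bool.false_eq_true, if_false]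
        rw [filter_nokey As op1 hna, filter_nokey Bs op1 hnb]
      rw [herase]
      apply boxesOf_set _ _ _ hb256
      · rw [List.filter_append, List.map_append]
      · intro b hblt hbne
        rw [hitems, filter_mid_ne As Bs op1 v b hbne]
    · have hfil := idxAll op1 (d.items.filter (fun p => hB p.1 == hB op1)) 0 hnsf
        (by intro hm
            obtain ⟨p, hp, he⟩ := List.mem_map.mp hm
            exact hmem (List.mem_map.mpr ⟨p, List.mem_of_mem_filter hp, he⟩))
      rw [hfil]
      simp only [List.map_nil, List.length_nil]
      norm_num
      have herase : (d.erase op1).items = d.items := by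
        show d.items.filter (fun p => !(p.1 == op1)) = d.items
        apply List.filter_eq_self.mpr
        intro p hp
        simp only [Bool.not_eq_eq_eq_not, Bool.not_true, beq_eq_false_iff_ne, ne_eq]
        intro he
        exact hmem (List.mem_map.mpr ⟨p, hp, he⟩)
      rw [herase]
  · simp only [hdash, if_false]
    by_cases heq : op0 = "="
    · obtain ⟨value, rest2, rfl⟩ : ∃ v r2, rest = v :: r2 := by
        have h3 := (hpre.2 (by simpa using heq)).1
        match rest, h3 with
        | v :: r2, _ => exact ⟨v, r2, rfl⟩
      rw [pyGet?_two_cons]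
      simp only [heq, if_true]
      by_cases hmem : op1 ∈ d.keys
      · have hnl : ' ' ∉ op1.toList := hns op1 hmem
        obtain ⟨As, v, Bs, hitems, hna, hnb⟩ := decomp d op1 hnd hmem
        have hnsa : ∀ p ∈ As.filter (fun p => hB p.1 == hB op1), ' ' ∉ p.1.toList := by
          intro p hp
          exact hnsf p (by rw [hitems, filter_mid_self]; exact List.mem_append_left _ hp)
        have hnsb : ∀ p ∈ Bs.filter (fun p => hB p.1 == hB op1), ' ' ∉ p.1.toList := by
          intro p hp
          exact hnsf p
            (by rw [hitems, filter_mid_self]; exact List.mem_append_right _ (List.mem_cons_of_mem _ hp))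
        have hna' : op1 ∉ (As.filter (fun p => hB p.1 == hB op1)).map (fun p => p.1) := by
          intro hm
          obtain ⟨p, hp, he⟩ := List.mem_map.mp hm
          exact hna (List.mem_map.mpr ⟨p, (List.mem_filter.mp hp).1, he⟩)
        have hnb' : op1 ∉ (Bs.filter (fun p => hB p.1 == hB op1)).map (fun p => p.1) := by
          intro hm
          obtain ⟨p, hp, he⟩ := List.mem_map.mp hm
          exact hnb (List.mem_map.mpr ⟨p, (List.mem_filter.mp hp).1, he⟩)
        set as' := As.filter (fun p => hB p.1 == hB op1) with has'
        set bs' := Bs.filter (fun p => hB p.1 == hB op1) with hbs'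
        have hfil : d.items.filter (fun p => hB p.1 == hB op1) = as' ++ (op1, v) :: bs' := by
          rw [hitems]; exact filter_mid_self As Bs op1 v
        rw [hfil, List.map_append, List.map_cons]
        rw [show (((PySem.List.enumerate (as'.map fmtP ++ fmtP (op1, v) :: bs'.map fmtP)).filter
              (fun q => firstTok q.2 == op1)).map (fun q => q.1)) = [(as'.length : Int)] by
          have := idxMid as' bs' v op1 hnsa hnsb hnl hna' hnb'
          simpa using this]
        simp only [List.length_cons, List.length_nil]
        norm_num
        rw [PySem.List.slice_from _ (by positivity)]
        rw [show ((as'.length : Int) + 1).toNat = as'.length + 1 by omega]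
        rw [show (as'.map fmtP ++ fmtP (op1, v) :: bs'.map fmtP).drop (as'.length + 1)
              = bs'.map fmtP by
          rw [show as'.length = (as'.map fmtP).length by simp]
          exact drop_mid _ _ _]
        have hcont : d.contains op1 = true := by
          rw [PySem.Dict.contains_eq_decide_mem_keys]
          simpa using hmem
        have hins : (d.insert op1 value).items = As ++ (op1, value) :: Bs := by
          rw [PySem.Dict.items_insert_of_contains d value hcont, hitems]
          rw [List.map_append, List.map_cons]
          have hAs : List.map (fun p => if (p.1 == op1) = true then (op1, value) else p) As
              = As := by
            conv_rhs => rw [← List.map_id As]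
            apply List.map_congr_left
            intro p hp
            have hne : (p.1 == op1) = false := by
              simp only [beq_eq_false_iff_ne, ne_eq]
              intro he
              exact hna (List.mem_map.mpr ⟨p, hp, he⟩)
            simp [hne]
          have hBs : List.map (fun p => if (p.1 == op1) = true then (op1, value) else p) Bs
              = Bs := by
            conv_rhs => rw [← List.map_id Bs]
            apply List.map_congr_left
            intro p hp
            have hne : (p.1 == op1) = false := by
              simp only [beq_eq_false_iff_ne, ne_eq]
              intro he
              exact hnb (List.mem_map.mpr ⟨p, hp, he⟩)
            simp [hne]
          rw [hAs, hBs]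
          simp
        rw [hins]
        apply boxesOf_set _ _ _ hb256
        · rw [filter_mid_self, List.map_append, List.map_cons]
          simp only [fmtP]
          rfl
        · intro b hblt hbne
          rw [hitems, filter_mid_ne As Bs op1 v b hbne,
            filter_mid_ne As Bs op1 value b hbne]
      · have hfil := idxAll op1 (d.items.filter (fun p => hB p.1 == hB op1)) 0 hnsf
          (by intro hm
              obtain ⟨p, hp, he⟩ := List.mem_map.mp hm
              exact hmem (List.mem_map.mpr ⟨p, List.mem_of_mem_filter hp, he⟩))
        rw [hfil]
        simp only [List.map_nil, List.length_nil, if_pos rfl]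
        have hcont : d.contains op1 = false := by
          rw [PySem.Dict.contains_eq_decide_mem_keys]
          simpa using hmem
        rw [PySem.Dict.items_insert_of_not_contains d value hcont]
        apply boxesOf_set _ _ _ hb256
        · rw [List.filter_append, List.filter_cons]
          simp [fmtP]
        · intro b hblt hbne
          rw [List.filter_append, List.filter_cons]
          have : (hB op1 == b) = false := by simpa using fun h => hbne h.symm
          simp [this]
    · simp only [heq, if_false]

theorem main_fold :
    ∀ (ops : List (List String)) (d : PySem.Dict String String),
      (∀ op ∈ ops,
        2 ≤ op.length ∧ (op.getD 0 "" = "=" → 3 ≤ op.length ∧ ' ' ∉ (op.getD 1 "").toList)) →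
      d.keys.Nodup → (∀ k ∈ d.keys, ' ' ∉ k.toList) →
      ops.foldl opStep (boxesOf d.items) = boxesOf (ops.foldl altStep d).items := by
  intro ops
  induction ops with
  | nil => intro d _ _ _; rfl
  | cons op ops ih =>
    intro d hpre hnd hns
    simp only [List.foldl_cons]
    rw [opStep_boxesOf d op (hpre op (by simp)) hnd hns]
    exact ih (altStep d op) (fun o ho => hpre o (by simp [ho]))
      (altStep_nodup d op hnd)
      (altStep_nospace d op (hpre op (by simp)).1 (fun h => ((hpre op (by simp)).2 h).2) hns)

-- ===== VERDICT (by name: the statement is the Claim_ definition above) =====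
theorem execute_operations_spec : Claim_equal_execute_operations := by
  intro operations _ hpre
  unfold Spec_execute_operations execute_operations
  rw [alt_eq_boxesOf]
  have h0 : boxesOf (PySem.Dict.empty : PySem.Dict String String).items
      = List.replicate 256 [] := boxesOf_nil
  rw [← h0]
  exact main_fold operations PySem.Dict.empty hpre (by simp [PySem.Dict.keys, PySem.Dict.empty])
    (by simp [PySem.Dict.keys, PySem.Dict.empty])
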